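-- pv_equiv track=rewrite | github.com/surmayi/GrokkingCoding | GoldmanSachs.py | CountNumberOfTeams
-- ===== SOURCE A (Python) =====
-- def CountNumberOfTeams(ratings):
--     def cal(input):
--         count = 0
--         for i in range(len(input)):
--             smallBefore, largeAfter = 0, 0
--             for j in range(i - 1, -1, -1):
--                 if input[j] < input[i]:
--                     smallBefore += 1
--             for j in range(i + 1, len(input)):
--                 if input[j] > input[i]:
--                     largeAfter += 1
--             count += largeAfter * smallBefore
--         return count
--
--     result = 0
--     result += cal(ratings)
--     result += cal(ratings[::-1])
--     return result
-- ===== SOURCE B (Python) =====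
-- def CountNumberOfTeams(ratings):
--     n = len(ratings)
--     inc2 = [0] * n
--     dec2 = [0] * n
--     total = 0
--     for j in range(n):
--         for i in range(j):
--             if ratings[i] < ratings[j]:
--                 total += inc2[i]
--                 inc2[j] += 1
--             elif ratings[i] > ratings[j]:
--                 total += dec2[i]
--                 dec2[j] += 1
--     return total
-- ===== Notes on version B (the rewrite author's own statement) =====
-- stated objective: alternative
-- what changed: Replaces A's per-middle-element smaller-before/larger-after product counting over the list and its reversal by a single dynamic-programming pass over pairs i<j that counts length-2 increasing/decreasing chains ending at each index and sums them into triples.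
import Mathlib
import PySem

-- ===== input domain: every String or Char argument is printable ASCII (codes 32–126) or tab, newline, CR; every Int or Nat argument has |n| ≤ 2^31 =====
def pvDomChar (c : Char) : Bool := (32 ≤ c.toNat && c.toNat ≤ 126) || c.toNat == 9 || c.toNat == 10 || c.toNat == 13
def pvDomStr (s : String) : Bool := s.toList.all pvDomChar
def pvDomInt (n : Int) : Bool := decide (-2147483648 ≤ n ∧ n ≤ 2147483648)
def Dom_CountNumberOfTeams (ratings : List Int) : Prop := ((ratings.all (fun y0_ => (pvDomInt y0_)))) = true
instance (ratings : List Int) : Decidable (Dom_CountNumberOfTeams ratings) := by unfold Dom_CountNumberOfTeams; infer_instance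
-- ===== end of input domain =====

-- B replaces A's per-middle smaller-before/larger-after product counting (on the list and its
-- reversal) by one DP pass over pairs i<j summing length-2 chain counts into triples; objective:
-- alternative algorithm of the same O(n^2) cost.

-- ===== PORT A =====
-- helper 'cal' of A: per middle index i, count (smaller strictly before) * (larger strictly after)
def pvCal (input : List Int) : Int :=
  (PySem.List.pyRange 0 (PySem.List.len input) 1).foldl (fun count i =>
    let smallBefore : Int :=
      (PySem.List.pyRange (i - 1) (-1) (-1)).foldl
        (fun sb j => if PySem.List.pyGetD input j 0 < PySem.List.pyGetD input i 0 then sb + 1 else sb) 0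
    let largeAfter : Int :=
      (PySem.List.pyRange (i + 1) (PySem.List.len input) 1).foldl
        (fun la j => if PySem.List.pyGetD input j 0 > PySem.List.pyGetD input i 0 then la + 1 else la) 0
    count + largeAfter * smallBefore) 0

def CountNumberOfTeams (ratings : List Int) : Int :=
  0 + pvCal ratings + pvCal ((PySem.List.slice? ratings none none (-1)).getD [])

-- ===== PORT B =====
-- loop body of B's inner 'for i in range(j)' (if/elif updating (inc2, dec2, total))
def pvStep (xs : List Int) (j : Int) (st : List Int × List Int × Int) (i : Int) :
    List Int × List Int × Int :=
  if PySem.List.pyGetD xs i 0 < PySem.List.pyGetD xs j 0 then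
    (PySem.List.pySetD st.1 j (PySem.List.pyGetD st.1 j 0 + 1), st.2.1,
     st.2.2 + PySem.List.pyGetD st.1 i 0)
  else if PySem.List.pyGetD xs i 0 > PySem.List.pyGetD xs j 0 then
    (st.1, PySem.List.pySetD st.2.1 j (PySem.List.pyGetD st.2.1 j 0 + 1),
     st.2.2 + PySem.List.pyGetD st.2.1 i 0)
  else st

def CountNumberOfTeams_alt (ratings : List Int) : Int :=
  let n := PySem.List.len ratings
  let st :=
    (PySem.List.pyRange 0 n).foldl (fun st j =>
      (PySem.List.pyRange 0 j).foldl (fun st i => pvStep ratings j st i) st)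
      (PySem.List.pyRepeat [(0 : Int)] n, PySem.List.pyRepeat [(0 : Int)] n, (0 : Int))
  st.2.2

-- ===== PRECONDITION & SPEC =====
def Spec_CountNumberOfTeams (ratings : List Int) (out : Int) : Prop := out = CountNumberOfTeams_alt ratings
instance (ratings : List Int) (out : Int) : Decidable (Spec_CountNumberOfTeams ratings out) := by unfold Spec_CountNumberOfTeams; infer_instance

-- ===== CLAIM (what is proved, stated in full; the proofs are below) =====
def Claim_equal_CountNumberOfTeams : Prop := ∀ (ratings : List Int), Dom_CountNumberOfTeams ratings → Spec_CountNumberOfTeams ratings (CountNumberOfTeams ratings)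

-- ===== LEMMAS AND PROOFS =====

-- 0/1 indicator
def pvInd (p : Prop) [Decidable p] : Int := if p then 1 else 0

theorem pvInd_congr {p q : Prop} [Decidable p] [Decidable q] (h : p ↔ q) : pvInd p = pvInd q := by
  unfold pvInd; exact if_congr h rfl rfl

theorem pvInd_mul (p q : Prop) [Decidable p] [Decidable q] : pvInd p * pvInd q = pvInd (p ∧ q) := by
  unfold pvInd; by_cases hp : p <;> by_cases hq : q <;> simp [hp, hq]

theorem pvInd_guard (p q : Prop) [Decidable p] [Decidable q] :
    (if p then pvInd q else 0) = pvInd (p ∧ q) := by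
  unfold pvInd; by_cases hp : p <;> by_cases hq : q <;> simp [hp, hq]

theorem pvSumRange (n : ℕ) (f : ℕ → Int) :
    ((List.range n).map f).sum = ∑ i ∈ Finset.range n, f i := by
  induction n with
  | zero => simp
  | succ m ih => rw [List.range_succ, Finset.sum_range_succ, List.map_append, List.sum_append]; simp [ih]

theorem pvRangeEqFilter (t n : ℕ) (h : t ≤ n) :
    Finset.range t = (Finset.range n).filter (fun i => i < t) := by
  ext i; simp [Finset.mem_filter]; omega

theorem pvIcoEqFilter (t n : ℕ) :
    Finset.Ico (t + 1) n = (Finset.range n).filter (fun k => t < k) := by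
  ext k; simp [Finset.mem_filter]; omega

-- a loop 'for k in range(t+1, n): acc += f(k)' as a guarded sum over range n
theorem pvSum_gt (t n : ℕ) (f : ℕ → Int) :
    ((List.range (n - (t + 1))).map (fun k => f (t + 1 + k))).sum
      = ∑ k ∈ Finset.range n, if t < k then f k else 0 := by
  rw [pvSumRange, ← Finset.sum_Ico_eq_sum_range, pvIcoEqFilter, Finset.sum_filter]

theorem pv_ite_to_add {α : Type} (p : α → Prop) [DecidablePred p] (l : List α) (a : Int) :
    l.foldl (fun acc x => if p x then acc + 1 else acc) a = l.foldl (fun acc x => acc + pvInd (p x)) a := by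
  rw [show (fun (acc : Int) x => if p x then acc + 1 else acc) = (fun acc x => acc + pvInd (p x)) from
    funext fun acc => funext fun x => by unfold pvInd; split <;> ring]

theorem pvMapRangeSum (n : ℕ) (g : ℤ → Int) :
    ((PySem.List.pyRange 0 (n : ℤ)).map g).sum = ∑ t ∈ Finset.range n, g ↑t := by
  rw [PySem.List.pyRange_zero_nat, List.map_map, pvSumRange]
  rfl

theorem pvMapIcoSum (c n : ℕ) (g : ℤ → Int) :
    ((PySem.List.pyRange ((c : ℤ) + 1) (n : ℤ)).map g).sum
      = ∑ k ∈ Finset.range n, if c < k then g ↑k else 0 := by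
  rw [PySem.List.pyRange_one]
  rw [show (((n : ℤ)) - ((c : ℤ) + 1)).toNat = n - (c + 1) from by omega]
  rw [List.map_map, pvSumRange, ← pvSum_gt c n (fun k => g ↑k), pvSumRange]
  exact Finset.sum_congr rfl fun m _ => congrArg g (by push_cast; ring)

theorem pvMapRevSum (t n : ℕ) (h : t ≤ n) (g : ℤ → Int) :
    ((PySem.List.pyRange ((t : ℤ) - 1) (-1) (-1)).map g).sum
      = ∑ i ∈ Finset.range n, if i < t then g ↑i else 0 := by
  rw [PySem.List.pyRange_neg_one_eq_reverse]
  rw [show ((-1 : ℤ) + 1) = 0 from by norm_num, show (((t : ℤ) - 1) + 1) = (t : ℤ) from by ring]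
  rw [List.map_reverse, List.sum_reverse, PySem.List.pyRange_zero_nat, List.map_map, pvSumRange,
      pvRangeEqFilter t n h, Finset.sum_filter]
  rfl

-- cube-sum counts of increasing / decreasing index triples, for r : ℕ → ℤ
def pvCI (n : ℕ) (r : ℕ → Int) : Int :=
  ∑ i ∈ Finset.range n, ∑ j ∈ Finset.range n, ∑ k ∈ Finset.range n,
    pvInd (i < j ∧ j < k ∧ r i < r j ∧ r j < r k)

def pvCD (n : ℕ) (r : ℕ → Int) : Int :=
  ∑ i ∈ Finset.range n, ∑ j ∈ Finset.range n, ∑ k ∈ Finset.range n,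
    pvInd (i < j ∧ j < k ∧ r j < r i ∧ r k < r j)

theorem pvSum3_swap (s : Finset ℕ) (f : ℕ → ℕ → ℕ → Int) :
    (∑ i ∈ s, ∑ j ∈ s, ∑ k ∈ s, f k j i) = ∑ i ∈ s, ∑ j ∈ s, ∑ k ∈ s, f i j k :=
  calc (∑ i ∈ s, ∑ j ∈ s, ∑ k ∈ s, f k j i)
      = ∑ i ∈ s, ∑ k ∈ s, ∑ j ∈ s, f k j i := Finset.sum_congr rfl (fun _ _ => Finset.sum_comm)
    _ = ∑ k ∈ s, ∑ i ∈ s, ∑ j ∈ s, f k j i := Finset.sum_comm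
    _ = ∑ k ∈ s, ∑ j ∈ s, ∑ i ∈ s, f k j i := Finset.sum_congr rfl (fun _ _ => Finset.sum_comm)

-- ---- machinery for B's DP loop ----
-- counts of smaller / greater elements strictly before position t
def pvI (xs : List Int) (t : ℕ) : Int := ∑ h ∈ Finset.range t, pvInd (xs.getD h 0 < xs.getD t 0)
def pvDn (xs : List Int) (t : ℕ) : Int := ∑ h ∈ Finset.range t, pvInd (xs.getD t 0 < xs.getD h 0)
-- contents of inc2 / dec2 after J full outer iterations
def pvA (xs : List Int) (J : ℕ) : List Int :=
  (List.range xs.length).map (fun t => if t < J then pvI xs t else 0)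
def pvB (xs : List Int) (J : ℕ) : List Int :=
  (List.range xs.length).map (fun t => if t < J then pvDn xs t else 0)
-- contribution of outer iteration j to total, and total after J outer iterations
def pvG (xs : List Int) (j : ℕ) : Int :=
  ∑ i ∈ Finset.range j,
    (pvInd (xs.getD i 0 < xs.getD j 0) * pvI xs i + pvInd (xs.getD j 0 < xs.getD i 0) * pvDn xs i)
def pvT (xs : List Int) (J : ℕ) : Int := ∑ j ∈ Finset.range J, pvG xs j

theorem pvGetD_set_self (l : List Int) (j : ℕ) (hj : j < l.length) (v : Int) :
    (l.set j v).getD j 0 = v := by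
  rw [List.getD_eq_getElem?_getD, List.getElem?_set_self (by omega)]
  simp

theorem pvGetD_set_ne (l : List Int) (i j : ℕ) (h : i ≠ j) (v : Int) :
    (l.set i v).getD j 0 = l.getD j 0 := by
  rw [List.getD_eq_getElem?_getD, List.getElem?_set_ne h]
  rfl

theorem pvA_length (xs : List Int) (J : ℕ) : (pvA xs J).length = xs.length := by
  simp [pvA]

theorem pvB_length (xs : List Int) (J : ℕ) : (pvB xs J).length = xs.length := by
  simp [pvB]

theorem pvA_getD (xs : List Int) (J t : ℕ) (ht : t < xs.length) :
    (pvA xs J).getD t 0 = if t < J then pvI xs t else 0 := by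
  rw [List.getD_eq_getElem?_getD]
  simp [pvA, ht]

theorem pvB_getD (xs : List Int) (J t : ℕ) (ht : t < xs.length) :
    (pvB xs J).getD t 0 = if t < J then pvDn xs t else 0 := by
  rw [List.getD_eq_getElem?_getD]
  simp [pvB, ht]

theorem pvA_set_self (xs : List Int) (j : ℕ) : (pvA xs j).set j 0 = pvA xs j := by
  apply List.ext_getElem (by simp)
  intro t h1 h2
  rw [List.getElem_set]
  split
  · simp [pvA]; omega
  · rfl

theorem pvB_set_self (xs : List Int) (j : ℕ) : (pvB xs j).set j 0 = pvB xs j := by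
  apply List.ext_getElem (by simp)
  intro t h1 h2
  rw [List.getElem_set]
  split
  · simp [pvB]; omega
  · rfl

theorem pvA_set_succ (xs : List Int) (j : ℕ) (hj : j < xs.length) :
    (pvA xs j).set j (∑ h ∈ Finset.range j, pvInd (xs.getD h 0 < xs.getD j 0)) = pvA xs (j + 1) := by
  apply List.ext_getElem (by simp [pvA])
  intro t h1 h2
  rw [List.getElem_set]
  simp only [pvA, List.getElem_map, List.getElem_range]
  by_cases hjt : j = t
  · rw [if_pos hjt, if_pos (by omega)]
    subst hjt; rfl
  · rw [if_neg hjt]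
    exact if_congr (by omega) rfl rfl

theorem pvB_set_succ (xs : List Int) (j : ℕ) (hj : j < xs.length) :
    (pvB xs j).set j (∑ h ∈ Finset.range j, pvInd (xs.getD j 0 < xs.getD h 0)) = pvB xs (j + 1) := by
  apply List.ext_getElem (by simp [pvB])
  intro t h1 h2
  rw [List.getElem_set]
  simp only [pvB, List.getElem_map, List.getElem_range]
  by_cases hjt : j = t
  · rw [if_pos hjt, if_pos (by omega)]
    subst hjt; rfl
  · rw [if_neg hjt]
    exact if_congr (by omega) rfl rfl

-- invariant of B's inner loop after its first m iterations
theorem pvInner (xs : List Int) (j : ℕ) (hj : j < xs.length) (T : Int) (m : ℕ) (hm : m ≤ j) :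
    (List.range m).foldl (fun st (i : ℕ) => pvStep xs ↑j st ↑i) (pvA xs j, pvB xs j, T)
      = ((pvA xs j).set j (∑ i ∈ Finset.range m, pvInd (xs.getD i 0 < xs.getD j 0)),
         (pvB xs j).set j (∑ i ∈ Finset.range m, pvInd (xs.getD j 0 < xs.getD i 0)),
         T + ∑ i ∈ Finset.range m,
           (pvInd (xs.getD i 0 < xs.getD j 0) * pvI xs i
              + pvInd (xs.getD j 0 < xs.getD i 0) * pvDn xs i)) := by
  induction m with
  | zero =>
    simp [pvA_set_self, pvB_set_self]
  | succ m ih =>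
    rw [List.range_succ, List.foldl_append, ih (by omega), List.foldl_cons, List.foldl_nil]
    have hmj : m < j := by omega
    have hmn : m < xs.length := by omega
    have hAl : ((pvA xs j).set j (∑ i ∈ Finset.range m, pvInd (xs.getD i 0 < xs.getD j 0))).length
        = xs.length := by simp [pvA_length]
    have hBl : ((pvB xs j).set j (∑ i ∈ Finset.range m, pvInd (xs.getD j 0 < xs.getD i 0))).length
        = xs.length := by simp [pvB_length]
    simp only [pvStep, PySem.List.pyGetD_natCast, gt_iff_lt, PySem.List.pySetD_natCast]
    rcases lt_trichotomy (xs.getD m 0) (xs.getD j 0) with h | h | h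
    · rw [if_pos h]
      simp only [List.set_set]
      rw [pvGetD_set_self _ j (by rw [pvA_length]; omega),
          pvGetD_set_ne _ j m (by omega), pvA_getD xs j m hmn, if_pos hmj]
      have e1 : pvInd (xs.getD m 0 < xs.getD j 0) = 1 := by unfold pvInd; rw [if_pos h]
      have e2 : pvInd (xs.getD j 0 < xs.getD m 0) = 0 := by unfold pvInd; rw [if_neg (by omega)]
      simp only [Finset.sum_range_succ, e1, e2, one_mul, zero_mul, add_zero, ← add_assoc]
    · rw [if_neg (by omega), if_neg (by omega)]
      have e1 : pvInd (xs.getD m 0 < xs.getD j 0) = 0 := by unfold pvInd; rw [if_neg (by omega)]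
      have e2 : pvInd (xs.getD j 0 < xs.getD m 0) = 0 := by unfold pvInd; rw [if_neg (by omega)]
      simp only [Finset.sum_range_succ, e1, e2, zero_mul, add_zero]
    · rw [if_neg (by omega), if_pos h]
      simp only [List.set_set]
      rw [pvGetD_set_self _ j (by rw [pvB_length]; omega),
          pvGetD_set_ne _ j m (by omega), pvB_getD xs j m hmn, if_pos hmj]
      have e1 : pvInd (xs.getD m 0 < xs.getD j 0) = 0 := by unfold pvInd; rw [if_neg (by omega)]
      have e2 : pvInd (xs.getD j 0 < xs.getD m 0) = 1 := by unfold pvInd; rw [if_pos h]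
      simp only [Finset.sum_range_succ, e1, e2, one_mul, zero_mul, add_zero, zero_add, ← add_assoc]

-- invariant of B's outer loop after J iterations
theorem pvOuter (xs : List Int) (J : ℕ) (hJ : J ≤ xs.length) :
    (List.range J).foldl
        (fun st (j : ℕ) => (List.range j).foldl (fun st (i : ℕ) => pvStep xs ↑j st ↑i) st)
        (List.replicate xs.length 0, List.replicate xs.length 0, 0)
      = (pvA xs J, pvB xs J, pvT xs J) := by
  induction J with
  | zero =>
    have hA : List.replicate xs.length (0 : Int) = pvA xs 0 := by
      apply List.ext_getElem (by simp [pvA])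
      intro t h1 h2
      simp [pvA]
    have hB : List.replicate xs.length (0 : Int) = pvB xs 0 := by
      apply List.ext_getElem (by simp [pvB])
      intro t h1 h2
      simp [pvB]
    rw [List.range_zero, List.foldl_nil]
    exact Prod.ext hA (Prod.ext hB (by simp [pvT]))
  | succ J ih =>
    rw [List.range_succ, List.foldl_append, ih (by omega), List.foldl_cons, List.foldl_nil]
    rw [pvInner xs J (by omega) (pvT xs J) J le_rfl]
    rw [pvA_set_succ xs J (by omega), pvB_set_succ xs J (by omega)]
    have : pvT xs J + ∑ i ∈ Finset.range J,
        (pvInd (xs.getD i 0 < xs.getD J 0) * pvI xs i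
          + pvInd (xs.getD J 0 < xs.getD i 0) * pvDn xs i) = pvT xs (J + 1) := by
      unfold pvT
      rw [Finset.sum_range_succ]
      rfl
    rw [this]

theorem pvW_combine (a b c d e : Prop) [Decidable a] [Decidable b] [Decidable c] [Decidable d]
    [Decidable e] :
    pvInd a * (if e then pvInd b else 0) + pvInd c * (if e then pvInd d else 0)
      = pvInd (e ∧ b ∧ a) + pvInd (e ∧ d ∧ c) := by
  unfold pvInd
  by_cases ha : a <;> by_cases hb : b <;> by_cases hc : c <;> by_cases hd : d <;>
    by_cases he : e <;> simp [ha, hb, hc, hd, he]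

theorem pvT_eq (xs : List Int) :
    pvT xs xs.length = pvCI xs.length (fun t => xs.getD t 0) + pvCD xs.length (fun t => xs.getD t 0) := by
  unfold pvT
  trans (∑ j ∈ Finset.range xs.length, ∑ i ∈ Finset.range xs.length, ∑ h ∈ Finset.range xs.length,
      (pvInd (h < i ∧ i < j ∧ xs.getD h 0 < xs.getD i 0 ∧ xs.getD i 0 < xs.getD j 0)
        + pvInd (h < i ∧ i < j ∧ xs.getD i 0 < xs.getD h 0 ∧ xs.getD j 0 < xs.getD i 0)))
  · refine Finset.sum_congr rfl fun j hj => ?_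
    simp only [Finset.mem_range] at hj
    unfold pvG
    rw [pvRangeEqFilter j xs.length (by omega), Finset.sum_filter]
    refine Finset.sum_congr rfl fun i hi => ?_
    simp only [Finset.mem_range] at hi
    by_cases hij : i < j
    · rw [if_pos hij]
      unfold pvI pvDn
      rw [pvRangeEqFilter i xs.length (by omega), Finset.sum_filter, Finset.sum_filter,
          Finset.mul_sum, Finset.mul_sum, ← Finset.sum_add_distrib]
      refine Finset.sum_congr rfl fun h _ => ?_
      rw [pvW_combine]
      exact congrArg₂ (· + ·) (pvInd_congr (by tauto)) (pvInd_congr (by tauto))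
    · rw [if_neg hij]
      symm
      refine Finset.sum_eq_zero fun h _ => ?_
      simp [pvInd, hij]
  · unfold pvCI pvCD
    simp only [← Finset.sum_add_distrib]
    rw [pvSum3_swap (Finset.range xs.length)
        (fun a b c => pvInd (a < b ∧ b < c ∧ xs.getD a 0 < xs.getD b 0 ∧ xs.getD b 0 < xs.getD c 0)
          + pvInd (a < b ∧ b < c ∧ xs.getD b 0 < xs.getD a 0 ∧ xs.getD c 0 < xs.getD b 0))]

theorem pvCal_eq (xs : List Int) :
    pvCal xs = pvCI xs.length (fun t => xs.getD t 0) := by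
  simp only [pvCal, PySem.List.len_eq, gt_iff_lt, pv_ite_to_add, PySem.List.foldl_add, zero_add,
    pvMapRangeSum]
  trans (∑ t ∈ Finset.range xs.length, ∑ k ∈ Finset.range xs.length, ∑ i ∈ Finset.range xs.length,
      pvInd ((t < k ∧ xs.getD t 0 < xs.getD k 0) ∧ (i < t ∧ xs.getD i 0 < xs.getD t 0)))
  · refine Finset.sum_congr rfl fun t ht => ?_
    simp only [Finset.mem_range] at ht
    rw [pvMapIcoSum, pvMapRevSum t xs.length (by omega)]
    simp only [pvInd_guard, PySem.List.pyGetD_natCast]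
    rw [Finset.sum_mul_sum]
    exact Finset.sum_congr rfl fun k _ => Finset.sum_congr rfl fun i _ => pvInd_mul _ _
  · unfold pvCI
    calc (∑ t ∈ Finset.range xs.length, ∑ k ∈ Finset.range xs.length, ∑ i ∈ Finset.range xs.length,
            pvInd ((t < k ∧ xs.getD t 0 < xs.getD k 0) ∧ (i < t ∧ xs.getD i 0 < xs.getD t 0)))
        = ∑ t ∈ Finset.range xs.length, ∑ i ∈ Finset.range xs.length, ∑ k ∈ Finset.range xs.length,
            pvInd ((t < k ∧ xs.getD t 0 < xs.getD k 0) ∧ (i < t ∧ xs.getD i 0 < xs.getD t 0)) :=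
          Finset.sum_congr rfl fun _ _ => Finset.sum_comm
      _ = ∑ i ∈ Finset.range xs.length, ∑ t ∈ Finset.range xs.length, ∑ k ∈ Finset.range xs.length,
            pvInd ((t < k ∧ xs.getD t 0 < xs.getD k 0) ∧ (i < t ∧ xs.getD i 0 < xs.getD t 0)) :=
          Finset.sum_comm
      _ = ∑ i ∈ Finset.range xs.length, ∑ j ∈ Finset.range xs.length, ∑ k ∈ Finset.range xs.length,
            pvInd (i < j ∧ j < k ∧ xs.getD i 0 < xs.getD j 0 ∧ xs.getD j 0 < xs.getD k 0) :=
          Finset.sum_congr rfl fun _ _ => Finset.sum_congr rfl fun _ _ =>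
            Finset.sum_congr rfl fun _ _ => pvInd_congr (by tauto)

theorem pvAlt_eq (xs : List Int) :
    CountNumberOfTeams_alt xs =
      pvCI xs.length (fun t => xs.getD t 0) + pvCD xs.length (fun t => xs.getD t 0) := by
  have : CountNumberOfTeams_alt xs = pvT xs xs.length := by
    simp only [CountNumberOfTeams_alt, PySem.List.len_eq, PySem.List.pyRepeat_singleton,
      Int.toNat_natCast, PySem.List.pyRange_zero_nat, List.foldl_map]
    rw [pvOuter xs xs.length le_rfl]
  rw [this, pvT_eq]

theorem pvCI_reverse (n : ℕ) (r r' : ℕ → Int) (h : ∀ i < n, r' i = r (n - 1 - i)) :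
    pvCI n r' = pvCD n r := by
  unfold pvCI pvCD
  rw [← pvSum3_swap (Finset.range n)
        (fun i j k => pvInd (i < j ∧ j < k ∧ r j < r i ∧ r k < r j))]
  conv_rhs => rw [← Finset.sum_range_reflect]
  refine Finset.sum_congr rfl fun i hi => ?_
  conv_rhs => rw [← Finset.sum_range_reflect]
  refine Finset.sum_congr rfl fun j hj => ?_
  conv_rhs => rw [← Finset.sum_range_reflect]
  refine Finset.sum_congr rfl fun k hk => ?_
  simp only [Finset.mem_range] at hi hj hk
  rw [h i hi, h j hj, h k hk]
  exact pvInd_congr (by constructor <;> (rintro ⟨a, b, c, d⟩; refine ⟨by omega, by omega, ?_, ?_⟩) <;> omega)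

-- ===== VERDICT (by name: the statement is the Claim_ definition above) =====
theorem CountNumberOfTeams_spec : Claim_equal_CountNumberOfTeams := by
  intro ratings _
  unfold Spec_CountNumberOfTeams CountNumberOfTeams
  rw [PySem.List.slice?_none_none_neg_one]
  simp only [Option.getD_some]
  rw [pvCal_eq, pvCal_eq, pvAlt_eq]
  rw [List.length_reverse]
  rw [pvCI_reverse ratings.length (fun t => ratings.getD t 0)
        (fun t => ratings.reverse.getD t 0)
        (by
          intro i hi
          simp only []
          rw [List.getD_eq_getElem?_getD, List.getD_eq_getElem?_getD,
              List.getElem?_reverse hi]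
          )]
  ring
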